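-- pv_equiv track=rewrite | github.com/PriyanshuCP42/house-price-prediction_agentic_ai | advisory_app.py | build_queue_status
-- ===== SOURCE A (Python) =====
-- def build_queue_status(agent_log: list[dict]):
--     ordered = [
--         "Intake",
--         "Valuation",
--         "Market Analyst",
--         "Comparables",
--         "Risk Assessor",
--         "Human Review",
--         "Neighborhood Analyst",
--         "Negotiation Strategist",
--         "Decision Analyst",
--         "Synthesizer",
--     ]
--     optional_agents = {"Market Analyst", "Human Review"}
--     running = next((entry["agent"] for entry in reversed(agent_log) if entry.get("phase") == "running"), None)
--     completed = {
--         entry["agent"]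
--         for entry in agent_log
--         if entry.get("phase") != "running" and "error" not in entry.get("phase", "")
--     }
--     failed = {entry["agent"] for entry in agent_log if "error" in entry.get("phase", "")}
--
--     current = running
--     has_terminal_progress = any(entry["agent"] == "Synthesizer" for entry in agent_log)
--     if current is None:
--         for name in ordered:
--             if name not in completed and name not in failed:
--                 current = name
--                 break
--
--     queue = []
--     for name in ordered:
--         if name in failed:
--             status = "Failed"
--         elif name in completed:
--             status = "Completed"
--         elif name in optional_agents and any(
--             ordered.index(entry["agent"]) > ordered.index(name)
--             for entry in agent_log
--             if entry.get("agent") in ordered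
--         ):
--             status = "Skipped"
--         elif has_terminal_progress:
--             status = "Skipped"
--         elif name == current and agent_log:
--             status = "Running"
--         else:
--             status = "Queued"
--         queue.append({"agent": name, "status": status})
--     return queue
-- ===== SOURCE B (Python) =====
-- def build_queue_status(agent_log: list[dict]):
--     ordered = [
--         "Intake",
--         "Valuation",
--         "Market Analyst",
--         "Comparables",
--         "Risk Assessor",
--         "Human Review",
--         "Neighborhood Analyst",
--         "Negotiation Strategist",
--         "Decision Analyst",
--         "Synthesizer",
--     ]
--     pos = {name: i for i, name in enumerate(ordered)}
--     optional_agents = {"Market Analyst", "Human Review"}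
--
--     # single pass over the log instead of one scan per derived quantity
--     running = None
--     completed = set()
--     failed = set()
--     max_logged_index = -1
--     has_terminal_progress = False
--     for entry in agent_log:
--         agent = entry["agent"]
--         phase = entry.get("phase", "")
--         if phase == "running":
--             running = agent
--         if "error" in phase:
--             failed.add(agent)
--         elif phase != "running":
--             completed.add(agent)
--         p = pos.get(agent)
--         if p is not None and p > max_logged_index:
--             max_logged_index = p
--         if agent == "Synthesizer":
--             has_terminal_progress = True
--
--     current = running
--     if current is None:
--         current = next((n for n in ordered if n not in completed and n not in failed), None)
--
--     queue = []
--     for i, name in enumerate(ordered):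
--         if name in failed:
--             status = "Failed"
--         elif name in completed:
--             status = "Completed"
--         elif name in optional_agents and max_logged_index > i:
--             status = "Skipped"
--         elif has_terminal_progress:
--             status = "Skipped"
--         elif name == current and agent_log:
--             status = "Running"
--         else:
--             status = "Queued"
--         queue.append({"agent": name, "status": status})
--     return queue
-- ===== Notes on version B (the rewrite author's own statement) =====
-- stated objective: alternative
-- what changed: B makes one pass over agent_log accumulating running/completed/failed/max-logged-index/has-terminal in a single fold (with a name->position dict), replacing A's five separate scans of the log and the per-agent nested any() with list.index rescans in the build loop by one precomputed max-index comparison (timing on generated inputs was unmeasurable, so no speed is claimed).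
-- outside the precondition, e.g. on build_queue_status([{'phase': 'done'}]): A raises KeyError, B raises KeyError
import Mathlib
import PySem

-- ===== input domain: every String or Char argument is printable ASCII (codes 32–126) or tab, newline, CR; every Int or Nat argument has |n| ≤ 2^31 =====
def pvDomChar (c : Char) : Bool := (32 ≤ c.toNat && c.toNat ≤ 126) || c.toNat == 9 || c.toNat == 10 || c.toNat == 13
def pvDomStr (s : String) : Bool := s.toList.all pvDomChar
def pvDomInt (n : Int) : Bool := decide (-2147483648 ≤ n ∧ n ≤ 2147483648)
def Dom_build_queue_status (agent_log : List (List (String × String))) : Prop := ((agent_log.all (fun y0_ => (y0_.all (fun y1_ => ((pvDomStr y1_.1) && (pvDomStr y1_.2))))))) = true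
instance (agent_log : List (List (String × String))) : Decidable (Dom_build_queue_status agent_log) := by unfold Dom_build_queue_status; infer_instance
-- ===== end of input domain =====

-- B computes running/completed/failed/max-logged-index/has-terminal in ONE pass over the log
-- (a fold with a name→position dict) instead of A's five separate scans and the per-agent
-- nested any()/list.index rescans; the return values are proved equal on Pre_.

-- shared primitives: a Python dict entry is a first-match association list
def pvAgent (e : List (String × String)) : String := PySem.Dict.getD (PySem.Dict.mk e) "agent" ""
def pvPhase? (e : List (String × String)) : Option String := PySem.Dict.get? (PySem.Dict.mk e) "phase"
def pvPhaseD (e : List (String × String)) : String := PySem.Dict.getD (PySem.Dict.mk e) "phase" ""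
def pvOrdered : List String :=
  ["Intake", "Valuation", "Market Analyst", "Comparables", "Risk Assessor",
   "Human Review", "Neighborhood Analyst", "Negotiation Strategist", "Decision Analyst", "Synthesizer"]

-- ===== PORT A =====
-- `entry["agent"]` is ported as pvAgent (getD ""): exact on Pre_, where the key is present.
def build_queue_status (agent_log : List (List (String × String))) : List (List (String × String)) :=
  let ordered := pvOrdered
  let optional_agents : PySem.Set String := PySem.Set.ofList ["Market Analyst", "Human Review"]
  let running : Option String :=
    (agent_log.reverse.find? (fun e => pvPhase? e == some "running")).map pvAgent
  let completed : PySem.Set String := PySem.Set.ofList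
    ((agent_log.filter (fun e => pvPhase? e != some "running" && !(PySem.Str.isIn "error" (pvPhaseD e)))).map pvAgent)
  let failed : PySem.Set String := PySem.Set.ofList
    ((agent_log.filter (fun e => PySem.Str.isIn "error" (pvPhaseD e))).map pvAgent)
  let has_terminal_progress := agent_log.any (fun e => pvAgent e == "Synthesizer")
  let current : Option String :=
    match running with
    | some r => some r
    | none => ordered.find? (fun name => !(PySem.Set.contains completed name) && !(PySem.Set.contains failed name))
  ordered.map (fun name =>
    let status :=
      if PySem.Set.contains failed name then "Failed"
      else if PySem.Set.contains completed name then "Completed"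
      else if PySem.Set.contains optional_agents name &&
          ((agent_log.filter (fun e => pvOrdered.contains (pvAgent e))).any
            (fun e => (PySem.List.index? pvOrdered (pvAgent e)).getD 0 > (PySem.List.index? pvOrdered name).getD 0)) then "Skipped"
      else if has_terminal_progress then "Skipped"
      else if some name == current && !agent_log.isEmpty then "Running"
      else "Queued"
    [("agent", name), ("status", status)])

-- ===== PORT B =====
-- pos = {name: i for i, name in enumerate(ordered)}
def pvPos : PySem.Dict String Int :=
  PySem.Dict.ofList ((PySem.List.enumerate pvOrdered 0).map (fun p => (p.2, p.1)))

structure PvSt where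
  running : Option String
  completed : PySem.Set String
  failed : PySem.Set String
  maxIdx : Int
  hasTerm : Bool
deriving Repr, DecidableEq

-- one iteration of B's single loop over the log
def pvStep (s : PvSt) (e : List (String × String)) : PvSt :=
  let agent := pvAgent e
  let phase := pvPhaseD e
  let s1 := if phase == "running" then { s with running := some agent } else s
  let s2 :=
    if PySem.Str.isIn "error" phase then { s1 with failed := PySem.Set.add s1.failed agent }
    else if phase != "running" then { s1 with completed := PySem.Set.add s1.completed agent }
    else s1
  let s3 :=
    match PySem.Dict.get? pvPos agent with
    | some p => if p > s2.maxIdx then { s2 with maxIdx := p } else s2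
    | none => s2
  if agent == "Synthesizer" then { s3 with hasTerm := true } else s3

-- B's initial accumulator (running=None, empty sets, max_logged_index=-1, has_terminal=False)
def pvInit : PvSt := ⟨none, PySem.Set.empty, PySem.Set.empty, -1, false⟩

def build_queue_status_alt (agent_log : List (List (String × String))) : List (List (String × String)) :=
  let optional_agents : PySem.Set String := PySem.Set.ofList ["Market Analyst", "Human Review"]
  let st := agent_log.foldl pvStep pvInit
  let current : Option String :=
    match st.running with
    | some r => some r
    | none => pvOrdered.find? (fun n => !(PySem.Set.contains st.completed n) && !(PySem.Set.contains st.failed n))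
  (PySem.List.enumerate pvOrdered 0).map (fun p =>
    let status :=
      if PySem.Set.contains st.failed p.2 then "Failed"
      else if PySem.Set.contains st.completed p.2 then "Completed"
      else if PySem.Set.contains optional_agents p.2 && st.maxIdx > p.1 then "Skipped"
      else if st.hasTerm then "Skipped"
      else if some p.2 == current && !agent_log.isEmpty then "Running"
      else "Queued"
    [("agent", p.2), ("status", status)])

-- ===== PRECONDITION & SPEC =====
-- Pre_ excludes logs with an entry lacking the "agent" key: B (and, on most such logs, A) raises
-- KeyError there; on the few such logs where A's short-circuited scans skip the bad entry and A
-- still returns, the value is an accident of evaluation order (see claim.json cites).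
def Pre_build_queue_status (agent_log : List (List (String × String))) : Prop :=
  (agent_log.all (fun e => ((PySem.Dict.mk e).get? "agent").isSome)) = true
instance (agent_log : List (List (String × String))) : Decidable (Pre_build_queue_status agent_log) := by
  unfold Pre_build_queue_status; infer_instance

def pvWitness_build_queue_status : (List (List (String × String))) :=
  [[("agent", "Intake"), ("phase", "running")], [("agent", "Valuation"), ("phase", "error: x")]]

def Spec_build_queue_status (agent_log : List (List (String × String))) (out : List (List (String × String))) : Prop := out = build_queue_status_alt agent_log
instance (agent_log : List (List (String × String))) (out : List (List (String × String))) : Decidable (Spec_build_queue_status agent_log out) := by unfold Spec_build_queue_status; infer_instance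

-- ===== CLAIM (what is proved, stated in full; the proofs are below) =====
def Claim_equal_build_queue_status : Prop := ∀ (agent_log : List (List (String × String))), Dom_build_queue_status agent_log → Pre_build_queue_status agent_log → Spec_build_queue_status agent_log (build_queue_status agent_log)

-- ===== LEMMAS AND PROOFS =====

theorem pvStep_running (s : PvSt) (e : List (String × String)) :
    (pvStep s e).running = if pvPhaseD e == "running" then some (pvAgent e) else s.running := by
  unfold pvStep
  by_cases h1 : (pvPhaseD e == "running") = true <;>
  by_cases h2 : PySem.Str.isIn "error" (pvPhaseD e) = true <;>
  cases h3 : PySem.Dict.get? pvPos (pvAgent e) <;>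
  by_cases h4 : (pvAgent e == "Synthesizer") = true <;>
  simp [h1, h2, h3, h4] <;> split_ifs <;> simp_all

theorem pvStep_completed (s : PvSt) (e : List (String × String)) :
    (pvStep s e).completed =
      if !(PySem.Str.isIn "error" (pvPhaseD e)) && pvPhaseD e != "running"
      then PySem.Set.add s.completed (pvAgent e) else s.completed := by
  unfold pvStep
  by_cases h1 : (pvPhaseD e == "running") = true <;>
  by_cases h2 : PySem.Str.isIn "error" (pvPhaseD e) = true <;>
  cases h3 : PySem.Dict.get? pvPos (pvAgent e) <;>
  by_cases h4 : (pvAgent e == "Synthesizer") = true <;>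
  simp [h1, h2, h3, h4] <;> split_ifs <;> simp_all

theorem pvStep_failed (s : PvSt) (e : List (String × String)) :
    (pvStep s e).failed =
      if PySem.Str.isIn "error" (pvPhaseD e) then PySem.Set.add s.failed (pvAgent e) else s.failed := by
  unfold pvStep
  by_cases h1 : (pvPhaseD e == "running") = true <;>
  by_cases h2 : PySem.Str.isIn "error" (pvPhaseD e) = true <;>
  cases h3 : PySem.Dict.get? pvPos (pvAgent e) <;>
  by_cases h4 : (pvAgent e == "Synthesizer") = true <;>
  simp [h1, h2, h3, h4] <;> split_ifs <;> simp_all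

theorem pvStep_maxIdx (s : PvSt) (e : List (String × String)) :
    (pvStep s e).maxIdx =
      match PySem.Dict.get? pvPos (pvAgent e) with
      | some p => if p > s.maxIdx then p else s.maxIdx
      | none => s.maxIdx := by
  unfold pvStep
  by_cases h1 : (pvPhaseD e == "running") = true <;>
  by_cases h2 : PySem.Str.isIn "error" (pvPhaseD e) = true <;>
  cases h3 : PySem.Dict.get? pvPos (pvAgent e) <;>
  by_cases h4 : (pvAgent e == "Synthesizer") = true <;>
  simp [h1, h2, h3, h4] <;> split_ifs <;> simp_all

theorem pvStep_hasTerm (s : PvSt) (e : List (String × String)) :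
    (pvStep s e).hasTerm = (s.hasTerm || pvAgent e == "Synthesizer") := by
  unfold pvStep
  by_cases h1 : (pvPhaseD e == "running") = true <;>
  by_cases h2 : PySem.Str.isIn "error" (pvPhaseD e) = true <;>
  cases h3 : PySem.Dict.get? pvPos (pvAgent e) <;>
  by_cases h4 : (pvAgent e == "Synthesizer") = true <;>
  simp [h1, h2, h3, h4] <;> split_ifs <;> simp_all

theorem pvPhase_test (e : List (String × String)) :
    (pvPhaseD e == "running") = (pvPhase? e == some "running") := by
  unfold pvPhaseD pvPhase? PySem.Dict.getD
  cases h : PySem.Dict.get? (PySem.Dict.mk e) "phase" <;> simp_all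

theorem set_contains_add (s : PySem.Set String) (a x : String) :
    PySem.Set.contains (PySem.Set.add s a) x = (PySem.Set.contains s x || a == x) := by
  cases h : a == x <;> simp_all [pysem] <;> simp_all [eq_comm]

theorem condA_eq (e : List (String × String)) :
    (pvPhase? e != some "running" && !(PySem.Str.isIn "error" (pvPhaseD e))) =
      (!(PySem.Str.isIn "error" (pvPhaseD e)) && pvPhaseD e != "running") := by
  have ht := pvPhase_test e
  cases h2 : PySem.Str.isIn "error" (pvPhaseD e) <;> cases h1 : pvPhaseD e == "running" <;>
    simp_all [bne]

theorem fold_running (log : List (List (String × String))) (s : PvSt) :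
    (log.foldl pvStep s).running =
      match log.reverse.find? (fun e => pvPhase? e == some "running") with
      | some e => some (pvAgent e)
      | none => s.running := by
  induction log generalizing s with
  | nil => rfl
  | cons e l ih =>
    simp only [List.foldl_cons, ih, List.reverse_cons, List.find?_append]
    cases h : l.reverse.find? (fun e => pvPhase? e == some "running") <;>
      simp [pvStep_running, pvPhase_test, Option.or] <;>
      cases h2 : (pvPhase? e == some "running") <;> simp_all

theorem fold_hasTerm (log : List (List (String × String))) (s : PvSt) :
    (log.foldl pvStep s).hasTerm = (s.hasTerm || log.any (fun e => pvAgent e == "Synthesizer")) := by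
  induction log generalizing s with
  | nil => simp
  | cons e l ih => simp [ih, pvStep_hasTerm, Bool.or_assoc]

theorem fold_completed (log : List (List (String × String))) (s : PvSt) (n : String) :
    PySem.Set.contains (log.foldl pvStep s).completed n =
      (PySem.Set.contains s.completed n ||
        log.any (fun e => (pvPhase? e != some "running" && !(PySem.Str.isIn "error" (pvPhaseD e))) && pvAgent e == n)) := by
  induction log generalizing s with
  | nil => simp
  | cons e l ih =>
    simp only [List.foldl_cons, List.any_cons, ih, pvStep_completed, condA_eq]
    split_ifs with hc
    · rw [set_contains_add]
      simp only [hc, Bool.true_and, Bool.or_assoc]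
    · simp only [Bool.not_eq_true] at hc
      simp only [hc, Bool.false_and, Bool.false_or]

theorem fold_failed (log : List (List (String × String))) (s : PvSt) (n : String) :
    PySem.Set.contains (log.foldl pvStep s).failed n =
      (PySem.Set.contains s.failed n ||
        log.any (fun e => PySem.Str.isIn "error" (pvPhaseD e) && pvAgent e == n)) := by
  induction log generalizing s with
  | nil => simp
  | cons e l ih =>
    simp only [List.foldl_cons, List.any_cons, ih, pvStep_failed]
    split_ifs with hc
    · rw [set_contains_add]
      simp only [hc, Bool.true_and, Bool.or_assoc]
    · simp only [Bool.not_eq_true] at hc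
      simp only [hc, Bool.false_and, Bool.false_or]

theorem fold_maxIdx (log : List (List (String × String))) (s : PvSt) (k : Int) :
    decide ((log.foldl pvStep s).maxIdx > k) =
      (decide (s.maxIdx > k) ||
        log.any (fun e => match PySem.Dict.get? pvPos (pvAgent e) with
                          | some p => decide (p > k)
                          | none => false)) := by
  induction log generalizing s with
  | nil => simp
  | cons e l ih =>
    rw [List.foldl_cons, ih, pvStep_maxIdx, List.any_cons]
    cases h : PySem.Dict.get? pvPos (pvAgent e) with
    | none => simp
    | some p =>
      by_cases hp : p > s.maxIdx <;> by_cases hk1 : s.maxIdx > k <;> by_cases hk2 : p > k <;>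
        simp [hp, hk1, hk2] <;> omega

set_option maxHeartbeats 1000000 in
theorem pvPos_get? (a : String) :
    PySem.Dict.get? pvPos a = (PySem.List.index? pvOrdered a).map (fun k => (k : Int)) := by
  have hp : pvPos = PySem.Dict.mk [("Intake",(0:Int)),("Valuation",1),("Market Analyst",2),("Comparables",3),("Risk Assessor",4),("Human Review",5),("Neighborhood Analyst",6),("Negotiation Strategist",7),("Decision Analyst",8),("Synthesizer",9)] := by decide
  rw [hp]
  simp only [PySem.Dict.get?_mk_cons, PySem.List.index?_eq_idxOf?, pvOrdered,
    List.idxOf?, List.findIdx?_cons, List.findIdx?_nil]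
  split_ifs <;> simp_all <;> rfl

theorem skip_any_eq (log : List (List (String × String))) (name : String) (k : Nat)
    (hk : PySem.List.index? pvOrdered name = some k) :
    ((log.filter (fun e => pvOrdered.contains (pvAgent e))).any
      (fun e => (PySem.List.index? pvOrdered (pvAgent e)).getD 0 > (PySem.List.index? pvOrdered name).getD 0))
    = decide ((log.foldl pvStep pvInit).maxIdx > (k : Int)) := by
  rw [fold_maxIdx, hk]
  have h0 : decide (pvInit.maxIdx > (k : Int)) = false := by
    simp only [pvInit, decide_eq_false_iff_not]
    omega
  rw [h0, Bool.false_or, List.any_filter]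
  refine List.any_congr rfl (fun a => ?_)
  rw [pvPos_get?]
  cases h : PySem.List.index? pvOrdered (pvAgent a) with
  | none =>
    have hnm : ¬ pvAgent a ∈ pvOrdered := (PySem.List.index?_eq_none_iff _ _).mp h
    rw [PySem.List.index?_eq_idxOf?] at h
    simp [h, hnm]
  | some j =>
    have hnm : pvAgent a ∈ pvOrdered := (PySem.List.index?_isSome_iff _ _).mp (by rw [h]; rfl)
    rw [PySem.List.index?_eq_idxOf?] at h
    simp [h, hnm]

theorem contains_ofList_map_filter (log : List (List (String × String)))
    (p : List (String × String) → Bool) (n : String) :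
    PySem.Set.contains (PySem.Set.ofList ((log.filter p).map pvAgent)) n
      = log.any (fun e => p e && pvAgent e == n) := by
  cases h : log.any (fun e => p e && pvAgent e == n) with
  | true =>
    rw [List.any_eq_true] at h
    obtain ⟨e, he, hc⟩ := h
    rw [Bool.and_eq_true, beq_iff_eq] at hc
    have hm : n ∈ PySem.Set.ofList ((log.filter p).map pvAgent) := by
      rw [PySem.Set.mem_ofList]
      exact List.mem_map.mpr ⟨e, List.mem_filter.mpr ⟨he, hc.1⟩, hc.2⟩
    simp [pysem, hm]
  | false =>
    rw [List.any_eq_false] at h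
    have hm : ¬ n ∈ PySem.Set.ofList ((log.filter p).map pvAgent) := by
      rw [PySem.Set.mem_ofList]
      intro hmem
      obtain ⟨e, hef, hae⟩ := List.mem_map.mp hmem
      obtain ⟨he, hpe⟩ := List.mem_filter.mp hef
      exact (h e he) (by simp [hpe, hae])
    simp [pysem, hm]

set_option maxHeartbeats 2000000 in
theorem main_eq (log : List (List (String × String))) :
    build_queue_status log = build_queue_status_alt log := by
  unfold build_queue_status build_queue_status_alt
  have hrun : (log.foldl pvStep pvInit).running
      = (log.reverse.find? (fun e => pvPhase? e == some "running")).map pvAgent := by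
    rw [fold_running]
    cases log.reverse.find? (fun e => pvPhase? e == some "running") <;> rfl
  have hcomp : ∀ n, PySem.Set.contains (log.foldl pvStep pvInit).completed n
      = PySem.Set.contains (PySem.Set.ofList
          ((log.filter (fun e => pvPhase? e != some "running" && !(PySem.Str.isIn "error" (pvPhaseD e)))).map pvAgent)) n := by
    intro n
    rw [fold_completed, contains_ofList_map_filter]
    simp [pvInit, pysem]
  have hfail : ∀ n, PySem.Set.contains (log.foldl pvStep pvInit).failed n
      = PySem.Set.contains (PySem.Set.ofList
          ((log.filter (fun e => PySem.Str.isIn "error" (pvPhaseD e))).map pvAgent)) n := by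
    intro n
    rw [fold_failed, contains_ofList_map_filter]
    simp [pvInit, pysem]
  have hterm : (log.foldl pvStep pvInit).hasTerm = log.any (fun e => pvAgent e == "Synthesizer") := by
    rw [fold_hasTerm]; rfl
  have hsk1 := skip_any_eq log "Market Analyst" 2 (by decide)
  have hsk2 := skip_any_eq log "Human Review" 5 (by decide)
  simp only [Nat.cast_ofNat, pvOrdered] at hsk1 hsk2
  simp only [show PySem.List.enumerate pvOrdered 0 =
      [((0:Int),"Intake"),(1,"Valuation"),(2,"Market Analyst"),(3,"Comparables"),(4,"Risk Assessor"),
       (5,"Human Review"),(6,"Neighborhood Analyst"),(7,"Negotiation Strategist"),(8,"Decision Analyst"),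
       (9,"Synthesizer")] from by decide, List.map_cons, List.map_nil]
  simp only [hrun, hcomp, hfail, hterm, ← hsk1, ← hsk2, pvOrdered]
  simp only [List.map_cons, List.map_nil,
    show (PySem.Set.ofList ["Market Analyst","Human Review"]).contains "Intake" = false from by decide,
    show (PySem.Set.ofList ["Market Analyst","Human Review"]).contains "Valuation" = false from by decide,
    show (PySem.Set.ofList ["Market Analyst","Human Review"]).contains "Comparables" = false from by decide,
    show (PySem.Set.ofList ["Market Analyst","Human Review"]).contains "Risk Assessor" = false from by decide,
    show (PySem.Set.ofList ["Market Analyst","Human Review"]).contains "Neighborhood Analyst" = false from by decide,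
    show (PySem.Set.ofList ["Market Analyst","Human Review"]).contains "Negotiation Strategist" = false from by decide,
    show (PySem.Set.ofList ["Market Analyst","Human Review"]).contains "Decision Analyst" = false from by decide,
    show (PySem.Set.ofList ["Market Analyst","Human Review"]).contains "Synthesizer" = false from by decide,
    Bool.false_and]
  rfl

-- ===== VERDICT (by name: the statement is the Claim_ definition above) =====
theorem build_queue_status_spec : Claim_equal_build_queue_status := by
  intro agent_log _ _
  unfold Spec_build_queue_status
  exact main_eq agent_log
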